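-- pv_equiv track=rewrite | github.com/manidhar2006/MLNS-Project | paper/mutgat_code/scripts/annotate_vcfs.py | _parse_eff_legacy
-- ===== SOURCE A (Python) =====
-- EFFECT_CLASSES = [
--     "stop_gained",
--     "frameshift_variant",
--     "start_lost",
--     "stop_lost",
--     "splice_region_variant",
--     "missense_variant",
--     "synonymous_variant",
--     "other",
-- ]
--
-- def _parse_eff_legacy(eff_field: str) -> str:
--     """Fallback for older snpEff EFF= format."""
--     legacy_map = {
--         "stop_gained": "stop_gained",
--         "frameshift_coding": "frameshift_variant",
--         "start_lost": "start_lost",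
--         "stop_lost": "stop_lost",
--         "splice_site_region": "splice_region_variant",
--         "non_synonymous_coding": "missense_variant",
--         "synonymous_coding": "synonymous_variant",
--         "non_synonymous_start": "missense_variant",
--     }
--     severity = {e: i for i, e in enumerate(EFFECT_CLASSES)}
--     best = "other"
--     best_rank = severity["other"]
--     for entry in eff_field.split(","):
--         eff_type = entry.split("(")[0].strip().lower()
--         mapped = legacy_map.get(eff_type, "other")
--         if severity.get(mapped, 99) < best_rank:
--             best_rank = severity[mapped]
--             best = mapped
--     return best
-- ===== SOURCE B (Python) =====
-- EFFECT_CLASSES = [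
--     "stop_gained",
--     "frameshift_variant",
--     "start_lost",
--     "stop_lost",
--     "splice_region_variant",
--     "missense_variant",
--     "synonymous_variant",
--     "other",
-- ]
--
-- LEGACY_MAP = {
--     "stop_gained": "stop_gained",
--     "frameshift_coding": "frameshift_variant",
--     "start_lost": "start_lost",
--     "stop_lost": "stop_lost",
--     "splice_site_region": "splice_region_variant",
--     "non_synonymous_coding": "missense_variant",
--     "synonymous_coding": "synonymous_variant",
--     "non_synonymous_start": "missense_variant",
-- }
--
-- def _parse_eff_legacy(eff_field: str) -> str:
--     """Collect the canonical effects present, then pick the first in severity order."""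
--     present = {
--         LEGACY_MAP.get(entry.split("(")[0].strip().lower(), "other")
--         for entry in eff_field.split(",")
--     }
--     for cls in EFFECT_CLASSES:
--         if cls in present:
--             return cls
--     return "other"
-- ===== Notes on version B (the rewrite author's own statement) =====
-- stated objective: simpler
-- what changed: Replaced the running-minimum fold over entries (carrying best/best_rank against a severity dict) by building the set of canonical effects present and scanning EFFECT_CLASSES in declared severity order for the first one present.
import Mathlib
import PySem

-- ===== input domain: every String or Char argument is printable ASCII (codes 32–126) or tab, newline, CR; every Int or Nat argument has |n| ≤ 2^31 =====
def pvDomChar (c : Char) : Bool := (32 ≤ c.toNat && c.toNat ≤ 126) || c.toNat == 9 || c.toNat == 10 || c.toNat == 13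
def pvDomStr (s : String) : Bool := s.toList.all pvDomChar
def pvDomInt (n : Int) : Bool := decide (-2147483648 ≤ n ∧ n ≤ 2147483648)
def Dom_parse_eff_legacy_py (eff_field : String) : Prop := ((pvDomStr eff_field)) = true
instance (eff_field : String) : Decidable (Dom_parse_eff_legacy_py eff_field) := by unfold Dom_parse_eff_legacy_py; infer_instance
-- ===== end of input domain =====

-- B replaces A's running-minimum fold (best/best_rank against a severity dict) by collecting the
-- set of canonical effects present and scanning EFFECT_CLASSES in severity order for the first present one (objective: simpler).


-- module constant EFFECT_CLASSES (shared by both Python modules)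
def effectClasses : List String :=
  ["stop_gained", "frameshift_variant", "start_lost", "stop_lost",
   "splice_region_variant", "missense_variant", "synonymous_variant", "other"]

-- ===== PORT A =====
-- entry.split("(")[0].strip().lower() — split on a nonempty literal separator is Chars.splitOn;
-- the [0] index is headD (exact: Python's str.split always returns a nonempty list, so IndexError is impossible)
def parse_eff_legacy_py (eff_field : String) : String :=
  let legacy_map : PySem.Dict String String := PySem.Dict.ofList [
    ("stop_gained", "stop_gained"),
    ("frameshift_coding", "frameshift_variant"),
    ("start_lost", "start_lost"),
    ("stop_lost", "stop_lost"),
    ("splice_site_region", "splice_region_variant"),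
    ("non_synonymous_coding", "missense_variant"),
    ("synonymous_coding", "synonymous_variant"),
    ("non_synonymous_start", "missense_variant")]
  let severity : PySem.Dict String Int :=
    (PySem.List.enumerate effectClasses).foldl (fun d p => d.insert p.2 p.1) PySem.Dict.empty
  -- severity["other"]: the key is present, so the KeyError branch is unreachable; getD is exact here
  let res := (PySem.Chars.splitOn eff_field.toList [',']).foldl (fun acc entry =>
    let eff_type := String.ofList (PySem.Chars.lower (PySem.Chars.strip ((PySem.Chars.splitOn entry ['(']).headD [])))
    let mapped := legacy_map.getD eff_type "other"
    if severity.getD mapped 99 < acc.2 then (mapped, severity.getD mapped 99) else acc)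
    ("other", severity.getD "other" 0)
  res.1

-- ===== PORT B =====
-- module constant LEGACY_MAP of Source B
def legacyMap : PySem.Dict String String := PySem.Dict.ofList [
  ("stop_gained", "stop_gained"),
  ("frameshift_coding", "frameshift_variant"),
  ("start_lost", "start_lost"),
  ("stop_lost", "stop_lost"),
  ("splice_site_region", "splice_region_variant"),
  ("non_synonymous_coding", "missense_variant"),
  ("synonymous_coding", "synonymous_variant"),
  ("non_synonymous_start", "missense_variant")]

def parse_eff_legacy_py_alt (eff_field : String) : String :=
  let present : PySem.Set String := PySem.Set.ofList
    ((PySem.Chars.splitOn eff_field.toList [',']).map (fun entry =>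
      legacyMap.getD (String.ofList (PySem.Chars.lower (PySem.Chars.strip ((PySem.Chars.splitOn entry ['(']).headD [])))) "other"))
  match effectClasses.find? (fun c => present.contains c) with
  | some c => c
  | none => "other"

-- ===== PRECONDITION & SPEC =====
def Spec_parse_eff_legacy_py (eff_field : String) (out : String) : Prop := out = parse_eff_legacy_py_alt eff_field
instance (eff_field : String) (out : String) : Decidable (Spec_parse_eff_legacy_py eff_field out) := by unfold Spec_parse_eff_legacy_py; infer_instance

-- ===== CLAIM (what is proved, stated in full; the proofs are below) =====
def Claim_equal_parse_eff_legacy_py : Prop := ∀ (eff_field : String), Dom_parse_eff_legacy_py eff_field → Spec_parse_eff_legacy_py eff_field (parse_eff_legacy_py eff_field)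

-- ===== LEMMAS AND PROOFS =====

-- A's severity lookup severity.getD m 99, as a function
def sev (m : String) : Int :=
  PySem.Dict.getD ((PySem.List.enumerate effectClasses).foldl (fun d p => d.insert p.2 p.1) PySem.Dict.empty) m 99

-- A's loop step, on the already-mapped effect
def stepA (acc : String × Int) (m : String) : String × Int :=
  if sev m < acc.2 then (m, sev m) else acc

theorem sev_inj : ∀ x ∈ effectClasses, ∀ y ∈ effectClasses, sev x = sev y → x = y := by decide

theorem mapped_mem (e : String) : legacyMap.getD e "other" ∈ effectClasses := by
  have h : legacyMap = PySem.Dict.mk [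
    ("stop_gained", "stop_gained"), ("frameshift_coding", "frameshift_variant"),
    ("start_lost", "start_lost"), ("stop_lost", "stop_lost"),
    ("splice_site_region", "splice_region_variant"), ("non_synonymous_coding", "missense_variant"),
    ("synonymous_coding", "synonymous_variant"), ("non_synonymous_start", "missense_variant")] := by decide
  rw [h]
  simp only [PySem.Dict.getD, PySem.Dict.get?_mk_cons]
  split_ifs <;> simp [effectClasses, PySem.Dict.get?]

-- A's fold computes an element of b :: ms of minimal severity, paired with its severity
theorem foldA_spec (ms : List String) : ∀ b : String, b ∈ effectClasses →
    (∀ x ∈ ms, x ∈ effectClasses) →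
    (ms.foldl stepA (b, sev b)).1 ∈ effectClasses ∧
    ((ms.foldl stepA (b, sev b)).1 = b ∨ (ms.foldl stepA (b, sev b)).1 ∈ ms) ∧
    (ms.foldl stepA (b, sev b)).2 = sev (ms.foldl stepA (b, sev b)).1 ∧
    sev (ms.foldl stepA (b, sev b)).1 ≤ sev b ∧
    ∀ x ∈ ms, sev (ms.foldl stepA (b, sev b)).1 ≤ sev x := by
  induction ms with
  | nil => intro b hb _; exact ⟨hb, Or.inl rfl, rfl, le_refl _, by simp⟩
  | cons x ms ih =>
    intro b hb hmem
    have hx : x ∈ effectClasses := hmem x (by simp)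
    have hms : ∀ y ∈ ms, y ∈ effectClasses := fun y hy => hmem y (by simp [hy])
    by_cases hc : sev x < sev b
    · have hstep : stepA (b, sev b) x = (x, sev x) := by simp [stepA, hc]
      have := ih x hx hms
      simp only [List.foldl_cons, hstep]
      refine ⟨this.1, Or.inr ?_, this.2.2.1, le_trans this.2.2.2.1 hc.le, ?_⟩
      · rcases this.2.1 with h | h
        · simp [h]
        · simp [h]
      · intro y hy
        rcases List.mem_cons.mp hy with h | h
        · exact h ▸ this.2.2.2.1
        · exact this.2.2.2.2 y h
    · have hstep : stepA (b, sev b) x = (b, sev b) := by simp [stepA, hc]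
      have := ih b hb hms
      simp only [List.foldl_cons, hstep]
      refine ⟨this.1, ?_, this.2.2.1, this.2.2.2.1, ?_⟩
      · rcases this.2.1 with h | h
        · exact Or.inl h
        · exact Or.inr (by simp [h])
      · intro y hy
        rcases List.mem_cons.mp hy with h | h
        · exact h ▸ le_trans this.2.2.2.1 (not_lt.mp hc)
        · exact this.2.2.2.2 y h

theorem contains_ofList (ms : List String) (c : String) : (PySem.Set.ofList ms).contains c = ms.contains c := by
  simp [PySem.Set.contains, PySem.Set.mem_ofList]

theorem findB_spec (ms : List String) (h : ∀ x ∈ ms, x ∈ effectClasses) :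
    ((match effectClasses.find? (fun c => (PySem.Set.ofList ms).contains c) with
      | some c => c | none => "other") ∈ ms ∨
     ((match effectClasses.find? (fun c => (PySem.Set.ofList ms).contains c) with
       | some c => c | none => "other") = "other" ∧ ms = [])) ∧
    (match effectClasses.find? (fun c => (PySem.Set.ofList ms).contains c) with
     | some c => c | none => "other") ∈ effectClasses ∧
    ∀ x ∈ ms, sev (match effectClasses.find? (fun c => (PySem.Set.ofList ms).contains c) with
     | some c => c | none => "other") ≤ sev x := by
  simp only [contains_ofList, effectClasses]
  by_cases h0 : "stop_gained" ∈ ms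
  · rw [List.find?_cons_of_pos (by simpa using h0)]
    refine ⟨Or.inl h0, by decide, ?_⟩
    intro x hx
    have key : ∀ y ∈ effectClasses, sev "stop_gained" ≤ sev y := by decide
    exact key x (h x hx)
  · rw [List.find?_cons_of_neg (by simpa using h0)]
    by_cases h1 : "frameshift_variant" ∈ ms
    · rw [List.find?_cons_of_pos (by simpa using h1)]
      refine ⟨Or.inl h1, by decide, ?_⟩
      intro x hx
      have key : ∀ y ∈ effectClasses, (y ≠ "stop_gained") → sev "frameshift_variant" ≤ sev y := by decide
      exact key x (h x hx) (fun e => h0 (e ▸ hx))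
    · rw [List.find?_cons_of_neg (by simpa using h1)]
      by_cases h2 : "start_lost" ∈ ms
      · rw [List.find?_cons_of_pos (by simpa using h2)]
        refine ⟨Or.inl h2, by decide, ?_⟩
        intro x hx
        have key : ∀ y ∈ effectClasses, (y ≠ "stop_gained" ∧ y ≠ "frameshift_variant") → sev "start_lost" ≤ sev y := by decide
        exact key x (h x hx) ⟨fun e => h0 (e ▸ hx), fun e => h1 (e ▸ hx)⟩
      · rw [List.find?_cons_of_neg (by simpa using h2)]
        by_cases h3 : "stop_lost" ∈ ms
        · rw [List.find?_cons_of_pos (by simpa using h3)]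
          refine ⟨Or.inl h3, by decide, ?_⟩
          intro x hx
          have key : ∀ y ∈ effectClasses, (y ≠ "stop_gained" ∧ y ≠ "frameshift_variant" ∧ y ≠ "start_lost") → sev "stop_lost" ≤ sev y := by decide
          exact key x (h x hx) ⟨fun e => h0 (e ▸ hx), fun e => h1 (e ▸ hx), fun e => h2 (e ▸ hx)⟩
        · rw [List.find?_cons_of_neg (by simpa using h3)]
          by_cases h4 : "splice_region_variant" ∈ ms
          · rw [List.find?_cons_of_pos (by simpa using h4)]
            refine ⟨Or.inl h4, by decide, ?_⟩
            intro x hx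
            have key : ∀ y ∈ effectClasses, (y ≠ "stop_gained" ∧ y ≠ "frameshift_variant" ∧ y ≠ "start_lost" ∧ y ≠ "stop_lost") → sev "splice_region_variant" ≤ sev y := by decide
            exact key x (h x hx) ⟨fun e => h0 (e ▸ hx), fun e => h1 (e ▸ hx), fun e => h2 (e ▸ hx), fun e => h3 (e ▸ hx)⟩
          · rw [List.find?_cons_of_neg (by simpa using h4)]
            by_cases h5 : "missense_variant" ∈ ms
            · rw [List.find?_cons_of_pos (by simpa using h5)]
              refine ⟨Or.inl h5, by decide, ?_⟩
              intro x hx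
              have key : ∀ y ∈ effectClasses, (y ≠ "stop_gained" ∧ y ≠ "frameshift_variant" ∧ y ≠ "start_lost" ∧ y ≠ "stop_lost" ∧ y ≠ "splice_region_variant") → sev "missense_variant" ≤ sev y := by decide
              exact key x (h x hx) ⟨fun e => h0 (e ▸ hx), fun e => h1 (e ▸ hx), fun e => h2 (e ▸ hx), fun e => h3 (e ▸ hx), fun e => h4 (e ▸ hx)⟩
            · rw [List.find?_cons_of_neg (by simpa using h5)]
              by_cases h6 : "synonymous_variant" ∈ ms
              · rw [List.find?_cons_of_pos (by simpa using h6)]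
                refine ⟨Or.inl h6, by decide, ?_⟩
                intro x hx
                have key : ∀ y ∈ effectClasses, (y ≠ "stop_gained" ∧ y ≠ "frameshift_variant" ∧ y ≠ "start_lost" ∧ y ≠ "stop_lost" ∧ y ≠ "splice_region_variant" ∧ y ≠ "missense_variant") → sev "synonymous_variant" ≤ sev y := by decide
                exact key x (h x hx) ⟨fun e => h0 (e ▸ hx), fun e => h1 (e ▸ hx), fun e => h2 (e ▸ hx), fun e => h3 (e ▸ hx), fun e => h4 (e ▸ hx), fun e => h5 (e ▸ hx)⟩
              · rw [List.find?_cons_of_neg (by simpa using h6)]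
                by_cases h7 : "other" ∈ ms
                · rw [List.find?_cons_of_pos (by simpa using h7)]
                  refine ⟨Or.inl h7, by decide, ?_⟩
                  intro x hx
                  have key : ∀ y ∈ effectClasses, (y ≠ "stop_gained" ∧ y ≠ "frameshift_variant" ∧ y ≠ "start_lost" ∧ y ≠ "stop_lost" ∧ y ≠ "splice_region_variant" ∧ y ≠ "missense_variant" ∧ y ≠ "synonymous_variant") → sev "other" ≤ sev y := by decide
                  exact key x (h x hx) ⟨fun e => h0 (e ▸ hx), fun e => h1 (e ▸ hx), fun e => h2 (e ▸ hx), fun e => h3 (e ▸ hx), fun e => h4 (e ▸ hx), fun e => h5 (e ▸ hx), fun e => h6 (e ▸ hx)⟩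
                · rw [List.find?_cons_of_neg (by simpa using h7)]
                  rw [List.find?_nil]
                  refine ⟨Or.inr ⟨rfl, ?_⟩, by decide, ?_⟩
                  · cases ms with
                    | nil => rfl
                    | cons y t =>
                      have hy := h y (by simp)
                      have hym : y ∈ y :: t := by simp
                      simp only [effectClasses, List.mem_cons, List.not_mem_nil, or_false] at hy
                      rcases hy with rfl|rfl|rfl|rfl|rfl|rfl|rfl|rfl <;> contradiction
                  · intro x hx
                    have hxC := h x hx
                    simp only [effectClasses, List.mem_cons, List.not_mem_nil, or_false] at hxC
                    rcases hxC with rfl|rfl|rfl|rfl|rfl|rfl|rfl|rfl <;> contradiction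

-- ===== VERDICT (by name: the statement is the Claim_ definition above) =====
theorem sev_other_le : ∀ y ∈ effectClasses, sev y ≤ sev "other" := by decide

theorem parse_eff_legacy_py_spec : Claim_equal_parse_eff_legacy_py := by
  intro eff _
  unfold Spec_parse_eff_legacy_py
  set f : List Char → String := fun entry =>
    legacyMap.getD (String.ofList (PySem.Chars.lower (PySem.Chars.strip ((PySem.Chars.splitOn entry ['(']).headD [])))) "other" with hf
  set ms : List String := (PySem.Chars.splitOn eff.toList [',']).map f with hms
  have hmem : ∀ x ∈ ms, x ∈ effectClasses := by
    intro x hx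
    rw [hms] at hx
    obtain ⟨e, _, rfl⟩ := List.mem_map.mp hx
    exact mapped_mem _
  have hA : parse_eff_legacy_py eff = (ms.foldl stepA ("other", sev "other")).1 := by
    rw [hms, List.foldl_map]
    rfl
  have hB : parse_eff_legacy_py_alt eff =
      (match effectClasses.find? (fun c => (PySem.Set.ofList ms).contains c) with
       | some c => c | none => "other") := by
    rw [hms]
    rfl
  obtain ⟨hACL, hAmem, -, hAle, hAmin⟩ := foldA_spec ms "other" (by decide) hmem
  obtain ⟨hBmem, hBCL, hBmin⟩ := findB_spec ms hmem
  rw [hA, hB]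
  rcases hBmem with hbm | ⟨hbo, hnil⟩
  · apply sev_inj _ hACL _ hBCL
    refine le_antisymm (hAmin _ hbm) ?_
    rcases hAmem with ha | ha
    · rw [ha]
      exact sev_other_le _ hBCL
    · exact hBmin _ ha
  · rw [hbo, hnil]
    rfl
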